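-- pv_equiv track=rewrite | github.com/VinCBR900/2650-Tiny-BASIC | tests/instruction_microtests.py | to_ihex
-- ===== SOURCE A (Python) =====
-- def to_ihex(image: dict[int, int]) -> str:
--     lines = []
--     addresses = sorted(image)
--     i = 0
--     while i < len(addresses):
--         start = addresses[i]
--         chunk = [image[start]]
--         i += 1
--         while i < len(addresses) and addresses[i] == start + len(chunk) and len(chunk) < 16:
--             chunk.append(image[addresses[i]])
--             i += 1
--         count = len(chunk)
--         addr_hi = (start >> 8) & 0xFF
--         addr_lo = start & 0xFF
--         rectype = 0
--         csum = (-(count + addr_hi + addr_lo + rectype + sum(chunk))) & 0xFF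
--         line = ":" + f"{count:02X}{start:04X}{rectype:02X}" + "".join(f"{b:02X}" for b in chunk) + f"{csum:02X}"
--         lines.append(line)
--     lines.append(":00000001FF")
--     return "\n".join(lines) + "\n"
-- ===== SOURCE B (Python) =====
-- def to_ihex(image: dict[int, int]) -> str:
--     # Phase 1: group the sorted addresses into maximal contiguous runs.
--     runs = []
--     for addr in sorted(image):
--         if runs and addr == runs[-1][0] + len(runs[-1][1]):
--             runs[-1][1].append(image[addr])
--         else:
--             runs.append((addr, [image[addr]]))
--     # Phase 2: emit each run as consecutive 16-byte records.
--     lines = []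
--     for start, data in runs:
--         while data:
--             chunk = data[:16]
--             csum = (-(len(chunk) + ((start >> 8) & 0xFF) + (start & 0xFF) + sum(chunk))) & 0xFF
--             lines.append(":" + f"{len(chunk):02X}{start:04X}00"
--                          + "".join(f"{b:02X}" for b in chunk) + f"{csum:02X}")
--             start += 16
--             data = data[16:]
--     lines.append(":00000001FF")
--     return "\n".join(lines) + "\n"
-- ===== Notes on version B (the rewrite author's own statement) =====
-- stated objective: alternative
-- what changed: Replaces A's single fused while-loop (which greedily cuts 16-byte records while scanning the sorted addresses) by a two-phase pipeline: first group the sorted addresses into maximal contiguous runs, then slice each run into consecutive 16-byte records.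
import Mathlib
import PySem

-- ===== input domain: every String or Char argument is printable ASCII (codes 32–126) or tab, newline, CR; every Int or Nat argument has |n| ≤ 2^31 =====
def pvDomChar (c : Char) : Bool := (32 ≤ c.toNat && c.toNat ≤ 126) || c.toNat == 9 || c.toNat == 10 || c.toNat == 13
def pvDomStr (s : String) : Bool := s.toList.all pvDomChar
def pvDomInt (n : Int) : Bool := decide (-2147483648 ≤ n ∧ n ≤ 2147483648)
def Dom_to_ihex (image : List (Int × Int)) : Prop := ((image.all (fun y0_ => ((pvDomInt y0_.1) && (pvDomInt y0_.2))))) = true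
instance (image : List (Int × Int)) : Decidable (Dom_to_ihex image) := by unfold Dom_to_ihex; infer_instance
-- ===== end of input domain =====

-- B groups the sorted addresses into maximal contiguous runs first and then slices each run
-- into 16-byte records, instead of A's single fused while-loop; same output (alternative decomposition).

-- ===== PORT A =====
-- shared helpers for both ports: Python's f"{n:0wX}" hex formatting and dict access,
-- identical character-level formatting in both Python sources.
def hexDigit (d : Nat) : Char := if d < 10 then Char.ofNat (48 + d) else Char.ofNat (55 + d)

-- upper-case hex digits of n (exact for Python's "{:X}" on nonnegative n)
def hexChars (n : Nat) : List Char :=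
  if h : n < 16 then [hexDigit n]
  else hexChars (n / 16) ++ [hexDigit (n % 16)]
decreasing_by exact Nat.div_lt_self (by omega) (by omega)

-- Python f"{n:0<w>X}": zero-padded to width w, the '-' sign counted in the width (exact)
def fmtX (w : Nat) (n : Int) : List Char :=
  if n < 0 then
    '-' :: (List.replicate ((w - 1) - (hexChars n.natAbs).length) '0' ++ hexChars n.natAbs)
  else
    List.replicate (w - (hexChars n.toNat).length) '0' ++ hexChars n.toNat

-- image[k]: first-match association-list lookup (dict; key always present when drawn from the keys)
def dictGet (image : List (Int × Int)) (k : Int) : Int := (image.lookup k).getD 0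

-- sorted(image): the dict's keys (distinct, insertion order), sorted
def sortedKeys (image : List (Int × Int)) : List Int :=
  PySem.List.sorted (PySem.List.dedup (image.map Prod.fst)) (fun x => x) false

-- A's line: ":" + f"{count:02X}{start:04X}{rectype:02X}" + hex bytes + f"{csum:02X}"
def recLineA (start : Int) (chunk : List Int) : List Char :=
  let count : Int := chunk.length
  let addr_hi := PySem.Int.band (start >>> (8:Nat)) 255
  let addr_lo := PySem.Int.band start 255
  let rectype : Int := 0
  let csum := PySem.Int.band (-(count + addr_hi + addr_lo + rectype + chunk.sum)) 255
  ':' :: (fmtX 2 count ++ fmtX 4 start ++ fmtX 2 rectype ++ (chunk.map (fmtX 2)).flatten ++ fmtX 2 csum)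

-- A's inner while: extend chunk while the next address is contiguous and the chunk is short
def innerA (get : Int → Int) : List Int → Int → List Int → (List Int × List Int)
  | [], _, chunk => (chunk, [])
  | a :: rest, start, chunk =>
    if a = start + (chunk.length : Int) ∧ chunk.length < 16 then
      innerA get rest start (chunk ++ [get a])
    else (chunk, a :: rest)

theorem innerA_snd_length_le (get : Int → Int) :
    ∀ (l : List Int) (s : Int) (c : List Int), (innerA get l s c).2.length ≤ l.length := by
  intro l
  induction l with
  | nil => intro s c; simp [innerA]
  | cons a rest ih =>
    intro s c
    simp only [innerA]
    split
    · exact le_trans (ih s (c ++ [get a])) (by simp)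
    · simp

-- A's outer while over the sorted addresses
def emitA (get : Int → Int) : List Int → List (List Char)
  | [] => []
  | a :: rest =>
    let p := innerA get rest a [get a]
    recLineA a p.1 :: emitA get p.2
termination_by l => l.length
decreasing_by
  simp only [List.length_cons]
  have := innerA_snd_length_le get rest a [get a]
  omega

def to_ihex (image : List (Int × Int)) : String :=
  String.mk (PySem.Chars.join ['\n']
    (emitA (dictGet image) (sortedKeys image) ++ [String.toList ":00000001FF"]) ++ ['\n'])

-- ===== PORT B =====
-- B's run builder: runs kept newest-first (Python appends to / mutates the LAST run; same data reversed at the end)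
def stepB (get : Int → Int) (runs : List (Int × List Int)) (a : Int) : List (Int × List Int) :=
  match runs with
  | (s, bs) :: t =>
    if a = s + (bs.length : Int) then (s, bs ++ [get a]) :: t
    else (a, [get a]) :: (s, bs) :: t
  | [] => [(a, [get a])]

-- B's line: ":" + f"{len(chunk):02X}{start:04X}00" + hex bytes + f"{csum:02X}"
def recLineB (start : Int) (chunk : List Int) : List Char :=
  let csum := PySem.Int.band
    (-((chunk.length : Int) + PySem.Int.band (start >>> (8:Nat)) 255 + PySem.Int.band start 255 + chunk.sum)) 255
  ':' :: (fmtX 2 chunk.length ++ fmtX 4 start ++ ['0', '0'] ++ (chunk.map (fmtX 2)).flatten ++ fmtX 2 csum)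

-- B's inner while: while data: emit data[:16]; start += 16; data = data[16:]
def emitRun (start : Int) (data : List Int) : List (List Char) :=
  if h : data = [] then []
  else
    recLineB start (PySem.List.slice data none (some 16)) ::
      emitRun (start + 16) (PySem.List.slice data (some 16) none)
termination_by data.length
decreasing_by
  rw [PySem.List.slice_from data (by norm_num)]
  simp only [List.length_drop]
  have : 0 < data.length := List.length_pos_of_ne_nil h
  omega

def to_ihex_alt (image : List (Int × Int)) : String :=
  String.mk (PySem.Chars.join ['\n']
    ((((sortedKeys image).foldl (stepB (dictGet image)) []).reverse.flatMap
        (fun r => emitRun r.1 r.2)) ++ [String.toList ":00000001FF"]) ++ ['\n'])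

-- ===== PRECONDITION & SPEC =====
def Spec_to_ihex (image : List (Int × Int)) (out : String) : Prop := out = to_ihex_alt image
instance (image : List (Int × Int)) (out : String) : Decidable (Spec_to_ihex image out) := by unfold Spec_to_ihex; infer_instance

-- ===== CLAIM (what is proved, stated in full; the proofs are below) =====
def Claim_equal_to_ihex : Prop := ∀ (image : List (Int × Int)), Dom_to_ihex image → Spec_to_ihex image (to_ihex image)

-- ===== LEMMAS AND PROOFS =====

-- length of the maximal contiguous prefix [next, next+1, …] of l
def cnt : List Int → Int → Nat
  | [], _ => 0
  | a :: t, next => if a = next then 1 + cnt t (next + 1) else 0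

-- the bytes of the k addresses s, s+1, …, s+k-1
def mapGet (get : Int → Int) (s : Int) (k : Nat) : List Int :=
  (PySem.List.pyRange s (s + (k : Int)) 1).map get

theorem length_mapGet (get : Int → Int) (s : Int) (k : Nat) : (mapGet get s k).length = k := by
  simp [mapGet, PySem.List.length_pyRange_one]

theorem mapGet_zero (get : Int → Int) (s : Int) : mapGet get s 0 = [] := by
  simp [mapGet, PySem.List.pyRange_one_eq_nil]

theorem mapGet_cons (get : Int → Int) (s : Int) (k : Nat) :
    mapGet get s (k + 1) = get s :: mapGet get (s + 1) k := by
  unfold mapGet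
  rw [PySem.List.pyRange_one_cons (by omega)]
  simp only [List.map_cons]
  congr 2
  push_cast; ring

theorem mapGet_snoc (get : Int → Int) (s : Int) (k : Nat) :
    mapGet get s (k + 1) = mapGet get s k ++ [get (s + (k : Int))] := by
  unfold mapGet
  push_cast
  rw [show s + ((k:Int) + 1) = (s + (k:Int)) + 1 from by ring,
    PySem.List.pyRange_one_succ_right (by omega)]
  simp

theorem mapGet_split (get : Int → Int) (s : Int) (k m : Nat) (h : m ≤ k) :
    mapGet get s k = mapGet get s m ++ mapGet get (s + (m : Int)) (k - m) := by
  unfold mapGet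
  rw [← List.map_append,
    show s + (m:Int) + ((k - m : Nat) : Int) = s + (k:Int) from by push_cast [h]; ring,
    ← PySem.List.pyRange_one_append s (s + (m:Int)) (s + (k:Int)) (by omega) (by omega)]

-- drop inside the contiguous prefix exposes address next+k
theorem cnt_head_drop : ∀ (l : List Int) (next : Int) (k : Nat), k < cnt l next →
    l.drop k = (next + (k : Int)) :: l.drop (k + 1) := by
  intro l
  induction l with
  | nil => intro next k h; simp [cnt] at h
  | cons a t ih =>
    intro next k h
    simp only [cnt] at h
    by_cases ha : a = next
    · simp only [ha, if_true] at h
      cases k with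
      | zero => simp [ha]
      | succ m =>
        simp only [List.drop_succ_cons]
        rw [ih (next + 1) m (by omega)]
        congr 1
        push_cast; ring
    · simp [ha] at h
  
theorem cnt_drop : ∀ (l : List Int) (next : Int) (k : Nat), k ≤ cnt l next →
    cnt (l.drop k) (next + (k : Int)) = cnt l next - k := by
  intro l
  induction l with
  | nil => intro next k h; simp [cnt] at h ⊢
  | cons a t ih =>
    intro next k h
    simp only [cnt] at h ⊢
    by_cases ha : a = next
    · simp only [ha, if_true] at h ⊢
      cases k with
      | zero => simp [cnt, ha]
      | succ m =>
        have := ih (next + 1) m (by omega)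
        simp only [List.drop_succ_cons]
        rw [show next + ((m + 1 : Nat) : Int) = next + 1 + (m : Int) from by push_cast; ring]
        rw [this]
        omega
    · simp [ha] at h
      subst h
      simp [cnt, ha]

-- the two line builders render identically
theorem recLine_eq (start : Int) (chunk : List Int) : recLineA start chunk = recLineB start chunk := by
  have h0 : fmtX 2 0 = ['0', '0'] := by
    simp [fmtX, hexChars, hexDigit]
  simp only [recLineA, recLineB, h0]
  norm_num

-- characterisation of A's inner while loop
theorem innerA_eq (get : Int → Int) : ∀ (l : List Int) (s : Int) (j : Nat), j ≤ 16 →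
    innerA get l s (mapGet get s j) =
      (mapGet get s (min (j + cnt l (s + (j : Int))) 16),
       l.drop (min (j + cnt l (s + (j : Int))) 16 - j)) := by
  intro l
  induction l with
  | nil =>
    intro s j hj
    simp only [innerA, cnt, Nat.add_zero, List.drop_nil]
    rw [min_eq_left hj]
  | cons b t ih =>
    intro s j hj
    simp only [innerA, length_mapGet, cnt]
    by_cases hb : b = s + (j : Int)
    · by_cases hj16 : j < 16
      · rw [if_pos ⟨hb, hj16⟩, if_pos hb]
        rw [show mapGet get s j ++ [get b] = mapGet get s (j + 1) from by rw [mapGet_snoc, hb]]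
        rw [ih s (j + 1) (by omega)]
        have hc : cnt t (s + ((j + 1 : Nat) : Int)) = cnt t (s + (j : Int) + 1) := by
          congr 1; push_cast; ring
        rw [hc]
        simp only [Prod.mk.injEq]
        refine ⟨by congr 1; omega, ?_⟩
        rw [show min (j + (1 + cnt t (s + (j:Int) + 1))) 16 - j
              = (min (j + (1 + cnt t (s + (j:Int) + 1))) 16 - (j + 1)) + 1 from by omega,
          List.drop_succ_cons]
        congr 1
        omega
      · rw [if_neg (by tauto), if_pos hb]
        have hj16' : j = 16 := by omega
        subst hj16'
        rw [show min (16 + (1 + cnt t (s + ((16:Nat):Int) + 1))) 16 = 16 from by omega]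
        simp
    · rw [if_neg (by tauto), if_neg hb]
      simp only [Nat.add_zero]
      rw [min_eq_left hj]
      simp

-- one step of B's per-run while loop on a known run
theorem emitRun_mapGet (get : Int → Int) (s : Int) (n : Nat) (hn : 0 < n) :
    emitRun s (mapGet get s n) =
      recLineB s (mapGet get s (min 16 n)) :: emitRun (s + 16) (mapGet get (s + 16) (n - 16)) := by
  rw [emitRun]
  have hne : mapGet get s n ≠ [] := by
    intro h
    have := length_mapGet get s n
    rw [h] at this
    simp at this
    omega
  rw [dif_neg hne]
  rw [PySem.List.slice_to _ (by norm_num), PySem.List.slice_from _ (by norm_num)]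
  by_cases h16 : 16 ≤ n
  · rw [mapGet_split get s n 16 h16]
    have hlen : (mapGet get s 16).length = 16 := length_mapGet get s 16
    congr 1
    · congr 1
      rw [List.take_append_of_le_length (by omega), List.take_of_length_le (by omega),
        min_eq_left h16]
    · congr 1
      rw [List.drop_append_of_le_length (by omega), List.drop_of_length_le (by omega)]
      simp
  · congr 1
    · congr 1
      rw [List.take_of_length_le (by rw [length_mapGet]; omega), min_eq_right (by omega)]
    · rw [List.drop_of_length_le (by rw [length_mapGet]; omega),
        show n - 16 = 0 from by omega, mapGet_zero]

-- A's fused loop consumes one maximal run as B's chunker renders it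
theorem emitA_run (get : Int → Int) : ∀ (c : Nat) (l : List Int) (a : Int), cnt l (a + 1) = c →
    emitA get (a :: l) = emitRun a (mapGet get a (1 + c)) ++ emitA get (l.drop c) := by
  intro c
  induction c using Nat.strong_induction_on with
  | _ c ih =>
    intro l a hc
    rw [emitA]
    have h1 : [get a] = mapGet get a 1 := by
      rw [show (1:Nat) = 0 + 1 from rfl, mapGet_snoc, mapGet_zero]
      simp
    have hcnt : cnt l (a + (1:Nat)) = c := by rw [show ((1:Nat):Int) = 1 from rfl]; exact hc
    rw [h1, innerA_eq get l a 1 (by omega)]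
    simp only [hcnt]
    by_cases hle : 1 + c ≤ 16
    · have hm : min (1 + c) 16 = 1 + c := by omega
      rw [hm]
      rw [emitRun_mapGet get a (1 + c) (by omega), min_eq_right hle,
        show 1 + c - 16 = 0 from by omega, mapGet_zero, emitRun, dif_pos rfl]
      simp [recLine_eq]
    · have hm : min (1 + c) 16 = 16 := by omega
      rw [hm]
      -- l.drop 15 = (a+16) :: l.drop 16
      have hd : l.drop 15 = (a + 16) :: l.drop 16 := by
        have := cnt_head_drop l (a + 1) 15 (by omega)
        rw [this]
        congr 1
        push_cast; ring
      have hc16 : cnt (l.drop 16) (a + 17) = c - 16 := by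
        have := cnt_drop l (a + 1) 16 (by omega)
        rw [show a + 1 + ((16:Nat):Int) = a + 17 from by push_cast; ring] at this
        omega
      have hrec := ih (c - 16) (by omega) (l.drop 16) (a + 16)
        (by rw [show a + 16 + 1 = a + 17 from by ring]; exact hc16)
      rw [show (16:Nat) - 1 = 15 from rfl, hd, hrec]
      rw [emitRun_mapGet get a (1 + c) (by omega), min_eq_left (by omega)]
      rw [show 1 + c - 16 = 1 + (c - 16) from by omega]
      simp only [recLine_eq, List.cons_append, List.drop_drop]
      rw [show 16 + (c - 16) = c from by omega]

-- B's foldl over a tail-extended accumulator never touches the tail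
theorem foldl_stepB_append (get : Int → Int) :
    ∀ (l : List Int) (X t : List (Int × List Int)), X ≠ [] →
      l.foldl (stepB get) (X ++ t) = l.foldl (stepB get) X ++ t := by
  intro l
  induction l with
  | nil => intro X t _; simp
  | cons a r ih =>
    intro X t hX
    match X with
    | (s, bs) :: X' =>
      simp only [List.cons_append, List.foldl_cons, stepB]
      split
      · rw [show ((s, bs ++ [get a]) : (Int × List Int)) :: (X' ++ t) = ((s, bs ++ [get a]) :: X') ++ t from rfl]
        exact ih ((s, bs ++ [get a]) :: X') t (by simp)
      · rw [show ((a, [get a]) : (Int × List Int)) :: (s, bs) :: (X' ++ t) = ((a, [get a]) :: (s, bs) :: X') ++ t from rfl]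
        exact ih ((a, [get a]) :: (s, bs) :: X') t (by simp)

-- B's foldl from a single open run closes it after its contiguous extension
theorem foldl_stepB_single (get : Int → Int) :
    ∀ (l : List Int) (s : Int) (bs : List Int),
      l.foldl (stepB get) [(s, bs)] =
        (l.drop (cnt l (s + (bs.length : Int)))).foldl (stepB get) [] ++
          [(s, bs ++ mapGet get (s + (bs.length : Int)) (cnt l (s + (bs.length : Int))))] := by
  intro l
  induction l with
  | nil => intro s bs; simp [cnt, mapGet_zero]
  | cons a t ih =>
    intro s bs
    simp only [List.foldl_cons, stepB, cnt]
    by_cases ha : a = s + (bs.length : Int)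
    · rw [if_pos ha, if_pos ha]
      rw [ih s (bs ++ [get a])]
      have hlen : (((bs ++ [get a]).length : Nat) : Int) = (bs.length : Int) + 1 := by
        simp
      rw [hlen, show s + ((bs.length:Int) + 1) = s + (bs.length:Int) + 1 from by ring]
      have hm : bs ++ [get a] ++ mapGet get (s + (bs.length:Int) + 1) (cnt t (s + (bs.length:Int) + 1))
          = bs ++ mapGet get (s + (bs.length:Int)) (1 + cnt t (s + (bs.length:Int) + 1)) := by
        rw [show 1 + cnt t (s + (bs.length:Int) + 1) = cnt t (s + (bs.length:Int) + 1) + 1 from by omega,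
          mapGet_cons, ← ha]
        simp
      rw [hm]
      rw [show 1 + cnt t (s + (bs.length:Int) + 1) = cnt t (s + (bs.length:Int) + 1) + 1 from by omega,
        List.drop_succ_cons]
    · rw [if_neg ha, if_neg ha]
      rw [show ((a, [get a]) : (Int × List Int)) :: [(s, bs)] = [(a, [get a])] ++ [(s, bs)] from rfl]
      rw [foldl_stepB_append get t [(a, [get a])] [(s, bs)] (by simp)]
      simp [mapGet_zero, stepB]

-- the two loop structures agree on every address list
theorem emit_eq_aux (get : Int → Int) : ∀ (n : Nat) (l : List Int), l.length ≤ n →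
    emitA get l = (l.foldl (stepB get) []).reverse.flatMap (fun r => emitRun r.1 r.2) := by
  intro n
  induction n with
  | zero =>
    intro l h
    have hl : l = [] := List.eq_nil_of_length_eq_zero (by omega)
    subst hl
    simp [emitA]
  | succ n ih =>
    intro l h
    match l with
    | [] => simp [emitA]
    | a :: t =>
      rw [emitA_run get (cnt t (a + 1)) t a rfl]
      simp only [List.foldl_cons]
      rw [show stepB get [] a = [(a, [get a])] from rfl,
        foldl_stepB_single get t a [get a],
        show a + ((([get a] : List Int).length : Nat) : Int) = a + 1 from by simp]
      rw [List.reverse_append]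
      simp only [List.reverse_cons, List.reverse_nil, List.nil_append, List.flatMap_cons,
        List.flatMap_append, List.flatMap_nil, List.append_nil]
      have hrun : [get a] ++ mapGet get (a + 1) (cnt t (a + 1)) = mapGet get a (1 + cnt t (a + 1)) := by
        rw [show 1 + cnt t (a + 1) = cnt t (a + 1) + 1 from by omega, mapGet_cons]
        simp
      rw [hrun]
      congr 1
      have hlen : (t.drop (cnt t (a + 1))).length ≤ n := by
        simp only [List.length_cons] at h
        simp only [List.length_drop]
        omega
      rw [ih (t.drop (cnt t (a + 1))) hlen]

theorem emit_eq (get : Int → Int) (l : List Int) :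
    emitA get l = (l.foldl (stepB get) []).reverse.flatMap (fun r => emitRun r.1 r.2) :=
  emit_eq_aux get l.length l le_rfl

-- ===== VERDICT (by name: the statement is the Claim_ definition above) =====
theorem to_ihex_spec : Claim_equal_to_ihex := by
  intro image _
  unfold Spec_to_ihex to_ihex to_ihex_alt
  rw [emit_eq]
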